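-- pv_equiv track=rewrite | github.com/startuplab-mx/HCKMX26-1776651006 | backend/classifier/pipeline.py | build_why
-- ===== SOURCE A (Python) =====
-- def build_why(explanations: list[dict[str, str]], limit: int = 6) -> list[str]:
--     """Turn the heuristic's `explanations` into short human-readable lines.
--
--     Cap at `limit` and dedupe so the bot's WhatsApp message stays
--     readable. Sorted by severity (alta first) so the most damning
--     signals show up at the top.
--     """
--     severity_rank = {"alta": 0, "media": 1, "baja": 2}
--     ordered = sorted(
--         explanations, key=lambda e: severity_rank.get(e.get("severity", "baja"), 3)
--     )
--     why: list[str] = []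
--     seen: set[str] = set()
--     for exp in ordered:
--         line = f"Se detectó {exp['what']} (fase: {exp['type']})"
--         if line not in seen:
--             seen.add(line)
--             why.append(line)
--         if len(why) >= limit:
--             break
--     return why
-- ===== SOURCE B (Python) =====
-- def build_why(explanations: list[dict[str, str]], limit: int = 6) -> list[str]:
--     """Bucket pass per severity rank (0..3) instead of a comparison sort;
--     stable within-rank order is the input order, so the output matches A's
--     stable sort-then-dedup exactly."""
--     severity_rank = {"alta": 0, "media": 1, "baja": 2}
--     why: list[str] = []
--     seen: set[str] = set()
--     for rank in range(4):
--         for exp in explanations: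
--             if severity_rank.get(exp.get("severity", "baja"), 3) != rank:
--                 continue
--             line = f"Se detectó {exp['what']} (fase: {exp['type']})"
--             if line not in seen:
--                 seen.add(line)
--                 why.append(line)
--             if len(why) >= limit:
--                 return why
--     return why
-- ===== Notes on version B (the rewrite author's own statement) =====
-- stated objective: alternative
-- what changed: Replaces the comparison sort with one bucket pass per severity rank (0..3) over the input, deduping and capping on the fly, exploiting that the key domain is fixed and the sort is stable.
import Mathlib
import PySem

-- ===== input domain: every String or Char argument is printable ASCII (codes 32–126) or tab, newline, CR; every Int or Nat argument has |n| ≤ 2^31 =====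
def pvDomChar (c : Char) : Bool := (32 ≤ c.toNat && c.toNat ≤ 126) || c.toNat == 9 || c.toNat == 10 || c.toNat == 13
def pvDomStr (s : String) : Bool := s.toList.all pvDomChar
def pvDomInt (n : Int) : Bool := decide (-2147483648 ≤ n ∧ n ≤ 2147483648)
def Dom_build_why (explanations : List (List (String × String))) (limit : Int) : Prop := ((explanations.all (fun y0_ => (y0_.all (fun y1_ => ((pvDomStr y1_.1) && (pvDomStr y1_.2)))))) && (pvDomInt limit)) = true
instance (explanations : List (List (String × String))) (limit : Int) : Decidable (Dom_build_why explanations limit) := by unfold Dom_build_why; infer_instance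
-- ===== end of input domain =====

-- B replaces A's comparison sort by one pass per severity rank (0..3) with early return; same lines, same order.

-- ===== PORT A =====
-- the for-loop with `break`: recursion over `ordered` carrying (why, seen)
def buildWhyLoop (limit : Int) : List (List (String × String)) → List String → PySem.Set String → List String
  | [], why, _seen => why
  | exp :: rest, why, seen =>
    let line := "Se detectó " ++ ((PySem.Dict.mk exp).get? "what").getD "" ++ " (fase: " ++ ((PySem.Dict.mk exp).get? "type").getD "" ++ ")"
    let ws := if PySem.Set.contains seen line then (why, seen)
              else (why ++ [line], PySem.Set.add seen line)
    if limit ≤ (ws.1.length : Int) then ws.1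
    else buildWhyLoop limit rest ws.1 ws.2

def build_why (explanations : List (List (String × String))) (limit : Int) : List String :=
  let ordered := PySem.List.sorted explanations
    (fun e => (PySem.Dict.mk [("alta", (0:Int)), ("media", 1), ("baja", 2)]).getD ((PySem.Dict.mk e).getD "severity" "baja") 3) false
  buildWhyLoop limit ordered [] PySem.Set.empty

-- ===== PORT B =====
-- inner `for exp in explanations` loop at a fixed rank; the Bool flags the `return why`
def altInner (limit rank : Int) : List (List (String × String)) → List String → PySem.Set String → List String × PySem.Set String × Bool
  | [], why, seen => (why, seen, false)
  | exp :: rest, why, seen =>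
    if (PySem.Dict.mk [("alta", (0:Int)), ("media", 1), ("baja", 2)]).getD ((PySem.Dict.mk exp).getD "severity" "baja") 3 ≠ rank then
      altInner limit rank rest why seen
    else
      let line := "Se detectó " ++ ((PySem.Dict.mk exp).get? "what").getD "" ++ " (fase: " ++ ((PySem.Dict.mk exp).get? "type").getD "" ++ ")"
      let ws := if PySem.Set.contains seen line then (why, seen)
                else (why ++ [line], PySem.Set.add seen line)
      if limit ≤ (ws.1.length : Int) then (ws.1, ws.2, true)
      else altInner limit rank rest ws.1 ws.2

-- outer `for rank in range(4)` loop
def altOuter (limit : Int) (explanations : List (List (String × String))) : List Int → List String → PySem.Set String → List String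
  | [], why, _seen => why
  | rank :: ranks, why, seen =>
    let r := altInner limit rank explanations why seen
    if r.2.2 then r.1 else altOuter limit explanations ranks r.1 r.2.1

def build_why_alt (explanations : List (List (String × String))) (limit : Int) : List String :=
  altOuter limit explanations (PySem.List.pyRange 0 4 1) [] PySem.Set.empty

-- ===== PRECONDITION & SPEC =====
-- Pre_ excludes explanations missing a 'what' or 'type' key, on which A raises KeyError; it is slightly
-- narrower than the exact crash condition because entries beyond the limit-break are never accessed by A.
def Pre_build_why (explanations : List (List (String × String))) (limit : Int) : Prop :=
  ∀ exp ∈ explanations, "what" ∈ exp.map Prod.fst ∧ "type" ∈ exp.map Prod.fst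
instance (explanations : List (List (String × String))) (limit : Int) : Decidable (Pre_build_why explanations limit) := by unfold Pre_build_why; infer_instance
def pvWitness_build_why : (List (List (String × String))) × Int :=
  ([[("severity", "alta"), ("what", "x"), ("type", "t")], [("what", "y"), ("type", "t")]], 6)
def Spec_build_why (explanations : List (List (String × String))) (limit : Int) (out : List String) : Prop := out = build_why_alt explanations limit
instance (explanations : List (List (String × String))) (limit : Int) (out : List String) : Decidable (Spec_build_why explanations limit out) := by unfold Spec_build_why; infer_instance

-- ===== CLAIM (what is proved, stated in full; the proofs are below) =====
def Claim_equal_build_why : Prop := ∀ (explanations : List (List (String × String))) (limit : Int), Dom_build_why explanations limit → Pre_build_why explanations limit → Spec_build_why explanations limit (build_why explanations limit)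

-- ===== LEMMAS AND PROOFS =====

-- the shared severity rank of an explanation
def rk (e : List (String × String)) : Int :=
  (PySem.Dict.mk [("alta", (0:Int)), ("media", 1), ("baja", 2)]).getD ((PySem.Dict.mk e).getD "severity" "baja") 3

theorem rk_cases (e : List (String × String)) : rk e = 0 ∨ rk e = 1 ∨ rk e = 2 ∨ rk e = 3 := by
  unfold rk
  simp only [PySem.Dict.getD_eq_get?_getD, PySem.Dict.get?_mk_cons]
  split_ifs <;> simp [PySem.Dict.get?]


theorem bucket_snoc {r : Int} {x : List (String × String)} {a : List (List (String × String))}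
    (h : ∀ y ∈ a, rk y = r) (hx : rk x = r) : ∀ y ∈ a ++ [x], rk y = r := by
  intro y hy
  rcases List.mem_append.1 hy with h' | h'
  · exact h y h'
  · simp at h'; simpa [h']

theorem insertBy_middle {α : Type} (before : α → α → Bool) (x : α) (ys zs : List α)
    (h1 : ∀ y ∈ ys, before x y = false) (h2 : ∀ z ∈ zs, before x z = true) :
    PySem.List.insertBy before x (ys ++ zs) = ys ++ x :: zs := by
  induction ys with
  | nil =>
    simp only [List.nil_append]
    cases zs with
    | nil => simp [PySem.List.insertBy]
    | cons z zs => simp [PySem.List.insertBy, h2 z (by simp)]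
  | cons y ys ih =>
    have hy : before x y = false := h1 y (by simp)
    simp only [List.cons_append, PySem.List.insertBy, hy, Bool.false_eq_true, if_false]
    rw [ih (fun y hy => h1 y (by simp [hy]))]

theorem foldl_ins_buckets (l : List (List (String × String)))
    (a0 a1 a2 a3 : List (List (String × String)))
    (h0 : ∀ y ∈ a0, rk y = 0) (h1 : ∀ y ∈ a1, rk y = 1)
    (h2 : ∀ y ∈ a2, rk y = 2) (h3 : ∀ y ∈ a3, rk y = 3) :
    l.foldl (fun acc x => PySem.List.insertBy (fun a b => decide (rk a < rk b)) x acc)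
      (a0 ++ a1 ++ a2 ++ a3)
    = (a0 ++ l.filter (fun e => rk e == 0)) ++ (a1 ++ l.filter (fun e => rk e == 1))
      ++ (a2 ++ l.filter (fun e => rk e == 2)) ++ (a3 ++ l.filter (fun e => rk e == 3)) := by
  induction l generalizing a0 a1 a2 a3 with
  | nil => simp
  | cons x l ih =>
    simp only [List.foldl_cons]
    rcases rk_cases x with hx | hx | hx | hx
    · have : PySem.List.insertBy (fun a b => decide (rk a < rk b)) x (a0 ++ a1 ++ a2 ++ a3)
          = a0 ++ x :: (a1 ++ a2 ++ a3) := by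
        rw [show a0 ++ a1 ++ a2 ++ a3 = a0 ++ (a1 ++ a2 ++ a3) by simp]
        apply insertBy_middle
        · intro y hy; simp [h0 y hy, hx]
        · intro z hz
          simp only [List.mem_append] at hz
          rcases hz with (hz | hz) | hz
          · simp [h1 z hz, hx]
          · simp [h2 z hz, hx]
          · simp [h3 z hz, hx]
      rw [this, show a0 ++ x :: (a1 ++ a2 ++ a3) = (a0 ++ [x]) ++ a1 ++ a2 ++ a3 by simp,
        ih (a0 ++ [x]) a1 a2 a3 (bucket_snoc h0 hx) h1 h2 h3]
      simp [List.filter_cons, hx]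
    · have : PySem.List.insertBy (fun a b => decide (rk a < rk b)) x (a0 ++ a1 ++ a2 ++ a3)
          = (a0 ++ a1) ++ x :: (a2 ++ a3) := by
        rw [show a0 ++ a1 ++ a2 ++ a3 = (a0 ++ a1) ++ (a2 ++ a3) by simp]
        apply insertBy_middle
        · intro y hy
          rcases List.mem_append.1 hy with h | h
          · simp [h0 y h, hx]
          · simp [h1 y h, hx]
        · intro z hz
          rcases List.mem_append.1 hz with h | h
          · simp [h2 z h, hx]
          · simp [h3 z h, hx]
      rw [this, show (a0 ++ a1) ++ x :: (a2 ++ a3) = a0 ++ (a1 ++ [x]) ++ a2 ++ a3 by simp,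
        ih a0 (a1 ++ [x]) a2 a3 h0 (bucket_snoc h1 hx) h2 h3]
      simp [List.filter_cons, hx]
    · have : PySem.List.insertBy (fun a b => decide (rk a < rk b)) x (a0 ++ a1 ++ a2 ++ a3)
          = (a0 ++ a1 ++ a2) ++ x :: a3 := by
        apply insertBy_middle
        · intro y hy
          rcases List.mem_append.1 hy with h | h
          · rcases List.mem_append.1 h with h' | h'
            · simp [h0 y h', hx]
            · simp [h1 y h', hx]
          · simp [h2 y h, hx]
        · intro z hz; simp [h3 z hz, hx]
      rw [this, show (a0 ++ a1 ++ a2) ++ x :: a3 = a0 ++ a1 ++ (a2 ++ [x]) ++ a3 by simp,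
        ih a0 a1 (a2 ++ [x]) a3 h0 h1 (bucket_snoc h2 hx) h3]
      simp [List.filter_cons, hx]
    · have : PySem.List.insertBy (fun a b => decide (rk a < rk b)) x (a0 ++ a1 ++ a2 ++ a3)
          = (a0 ++ a1 ++ a2 ++ a3) ++ [x] := by
        have hmid := insertBy_middle (fun a b => decide (rk a < rk b)) x (a0 ++ a1 ++ a2 ++ a3) []
          (by
            intro y hy
            rcases List.mem_append.1 hy with h | h
            · rcases List.mem_append.1 h with h' | h'
              · rcases List.mem_append.1 h' with h'' | h''
                · simp [h0 y h'', hx]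
                · simp [h1 y h'', hx]
              · simp [h2 y h', hx]
            · simp [h3 y h, hx])
          (by intro z hz; simp at hz)
        simpa using hmid
      rw [this, show (a0 ++ a1 ++ a2 ++ a3) ++ [x]
          = a0 ++ a1 ++ a2 ++ (a3 ++ [x]) by simp,
        ih a0 a1 a2 (a3 ++ [x]) h0 h1 h2 (bucket_snoc h3 hx)]
      simp [List.filter_cons, hx]

theorem sorted_buckets (l : List (List (String × String))) :
    PySem.List.sorted l (fun e => rk e) false
    = l.filter (fun e => rk e == 0) ++ l.filter (fun e => rk e == 1)
      ++ l.filter (fun e => rk e == 2) ++ l.filter (fun e => rk e == 3) := by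
  have := foldl_ins_buckets l [] [] [] [] (by simp) (by simp) (by simp) (by simp)
  simpa [PySem.List.sorted] using this

-- ghost version of A's loop exposing the final (why, seen) state and the break flag
def aLoopX (limit : Int) : List (List (String × String)) → List String → PySem.Set String → List String × PySem.Set String × Bool
  | [], why, seen => (why, seen, false)
  | exp :: rest, why, seen =>
    let line := "Se detectó " ++ ((PySem.Dict.mk exp).get? "what").getD "" ++ " (fase: " ++ ((PySem.Dict.mk exp).get? "type").getD "" ++ ")"
    let ws := if PySem.Set.contains seen line then (why, seen)
              else (why ++ [line], PySem.Set.add seen line)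
    if limit ≤ (ws.1.length : Int) then (ws.1, ws.2, true)
    else aLoopX limit rest ws.1 ws.2

theorem aLoop_eq_X (limit : Int) (xs : List (List (String × String))) (why : List String) (seen : PySem.Set String) :
    buildWhyLoop limit xs why seen = (aLoopX limit xs why seen).1 := by
  induction xs generalizing why seen with
  | nil => rfl
  | cons x xs ih =>
    simp only [buildWhyLoop, aLoopX]
    split <;> split <;> first | rfl | exact ih _ _

theorem aLoopX_append (limit : Int) (l1 l2 : List (List (String × String))) (why : List String) (seen : PySem.Set String) :
    aLoopX limit (l1 ++ l2) why seen
    = (let r := aLoopX limit l1 why seen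
       if r.2.2 then r else aLoopX limit l2 r.1 r.2.1) := by
  induction l1 generalizing why seen with
  | nil => simp [aLoopX]
  | cons x l1 ih =>
    simp only [List.cons_append, aLoopX]
    split <;> split <;> first | exact ih _ _ | simp

theorem aLoopX_filter_eq_inner (limit rank : Int) (l : List (List (String × String))) (why : List String) (seen : PySem.Set String) :
    aLoopX limit (l.filter (fun e => rk e == rank)) why seen = altInner limit rank l why seen := by
  induction l generalizing why seen with
  | nil => rfl
  | cons x l ih =>
    by_cases hx : rk x = rank
    · rw [show List.filter (fun e => rk e == rank) (x :: l)
          = x :: List.filter (fun e => rk e == rank) l by simp [List.filter_cons, hx]]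
      simp only [altInner]
      split
      · next h => exact absurd hx h
      · simp only [aLoopX]
        split <;> split <;> first | rfl | exact ih _ _
    · rw [show List.filter (fun e => rk e == rank) (x :: l)
          = List.filter (fun e => rk e == rank) l by simp [List.filter_cons, hx]]
      simp only [altInner]
      split
      · exact ih _ _
      · next h => exact absurd (not_not.mp h) hx

-- ===== VERDICT (by name: the statement is the Claim_ definition above) =====
theorem build_why_spec : Claim_equal_build_why := by
  intro explanations limit _hDom _hPre
  unfold Spec_build_why build_why build_why_alt
  have hrange : PySem.List.pyRange 0 4 1 = [0, 1, 2, 3] := by decide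
  have hkey : (fun e => (PySem.Dict.mk [("alta", (0:Int)), ("media", 1), ("baja", 2)]).getD ((PySem.Dict.mk e).getD "severity" "baja") 3)
      = (fun e => rk e) := rfl
  rw [hrange, hkey, aLoop_eq_X, sorted_buckets]
  rw [show ∀ (f0 f1 f2 f3 : List (List (String × String))), f0 ++ f1 ++ f2 ++ f3 = f0 ++ (f1 ++ (f2 ++ f3)) by intros; simp]
  rw [aLoopX_append]
  simp only [aLoopX_filter_eq_inner]
  simp only [altOuter]
  cases h0 : (altInner limit 0 explanations [] PySem.Set.empty).2.2
  · simp only [h0, if_false, Bool.false_eq_true]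
    rw [aLoopX_append]
    simp only [aLoopX_filter_eq_inner]
    cases h1 : (altInner limit 1 explanations (altInner limit 0 explanations [] PySem.Set.empty).1 (altInner limit 0 explanations [] PySem.Set.empty).2.1).2.2
    · simp only [h1, if_false, Bool.false_eq_true]
      rw [aLoopX_append]
      simp only [aLoopX_filter_eq_inner]
      cases h2 : (altInner limit 2 explanations _ _).2.2
      · simp only [h2, if_false, Bool.false_eq_true]
        simp [aLoopX_filter_eq_inner, altOuter]
      · simp [h2]
    · simp [h1]
  · simp [h0]
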